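-- pv_equiv track=rewrite | github.com/S1rt3ge/code-review-agent | backend/tests/test_release_workflow.py | _has_nonempty_unreleased_section
-- ===== SOURCE A (Python) =====
-- def _has_nonempty_unreleased_section(changelog: str) -> bool:
--     lines = changelog.splitlines()
--     found = False
--     content = False
--     for line in lines:
--         if line.startswith("## [Unreleased]"):
--             found = True
--             continue
--         if found and line.startswith("## ["):
--             break
--         if found and line.strip():
--             content = True
--     return found and content
-- ===== SOURCE B (Python) =====
-- def _has_nonempty_unreleased_section(changelog: str) -> bool:
--     lines = changelog.splitlines()
--     i = _first_unreleased_idx(lines)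
--     if i is None:
--         return False
--     for line in lines[i + 1:]:
--         if line.startswith("## [Unreleased]"):
--             continue
--         if line.startswith("## ["):
--             return False
--         if line.strip():
--             return True
--     return False
--
--
-- def _first_unreleased_idx(lines):
--     for k, line in enumerate(lines):
--         if line.startswith("## [Unreleased]"):
--             return k
--     return None
-- ===== Notes on version B (the rewrite author's own statement) =====
-- stated objective: alternative
-- what changed: Replaces A's single pass with two accumulator booleans by a two-phase locate-then-inspect structure: first find the index of the unreleased-section header line, then scan only the lines after it with early returns and no boolean state.
import Mathlib
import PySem

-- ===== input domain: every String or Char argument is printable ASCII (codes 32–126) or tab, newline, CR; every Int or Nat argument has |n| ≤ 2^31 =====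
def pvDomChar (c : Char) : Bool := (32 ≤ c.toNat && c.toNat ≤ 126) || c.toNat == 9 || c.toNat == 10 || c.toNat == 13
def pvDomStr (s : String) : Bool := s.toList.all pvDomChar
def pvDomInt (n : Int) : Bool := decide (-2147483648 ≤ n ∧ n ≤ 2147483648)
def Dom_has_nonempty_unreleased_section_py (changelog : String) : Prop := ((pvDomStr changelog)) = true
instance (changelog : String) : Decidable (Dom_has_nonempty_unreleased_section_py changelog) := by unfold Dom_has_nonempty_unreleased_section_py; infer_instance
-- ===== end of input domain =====

-- B replaces A's single pass with two booleans by a locate-the-header phase plus an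
-- early-return scan of the lines after it (alternative decomposition, same cost).

-- ===== PORT A =====
-- A's for-loop over lines with accumulators `found`, `content`; `break` returns `found && content`.
def pyA_loop (lines : List String) (found content : Bool) : Bool :=
  match lines with
  | [] => found && content
  | line :: rest =>
    if PySem.Str.startswith line "## [Unreleased]" then
      pyA_loop rest true content
    else if found && PySem.Str.startswith line "## [" then
      found && content
    else if found && (PySem.Str.strip line != "") then
      pyA_loop rest found true
    else
      pyA_loop rest found content

def has_nonempty_unreleased_section_py (changelog : String) : Bool :=
  pyA_loop (PySem.Str.splitlines changelog) false false

-- ===== PORT B =====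
-- helper _first_unreleased_idx: enumerate-style search for the header line
def pyB_find (lines : List String) (k : Nat) : Option Nat :=
  match lines with
  | [] => none
  | line :: rest =>
    if PySem.Str.startswith line "## [Unreleased]" then some k
    else pyB_find rest (k + 1)

-- the for-loop over lines[i+1:] with early returns
def pyB_scan (lines : List String) : Bool :=
  match lines with
  | [] => false
  | line :: rest =>
    if PySem.Str.startswith line "## [Unreleased]" then pyB_scan rest
    else if PySem.Str.startswith line "## [" then false
    else if PySem.Str.strip line != "" then true
    else pyB_scan rest

def has_nonempty_unreleased_section_py_alt (changelog : String) : Bool :=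
  let lines := PySem.Str.splitlines changelog
  match pyB_find lines 0 with
  | none => false
  | some i => pyB_scan (lines.drop (i + 1))

-- ===== PRECONDITION & SPEC =====
def Spec_has_nonempty_unreleased_section_py (changelog : String) (out : Bool) : Prop := out = has_nonempty_unreleased_section_py_alt changelog
instance (changelog : String) (out : Bool) : Decidable (Spec_has_nonempty_unreleased_section_py changelog out) := by unfold Spec_has_nonempty_unreleased_section_py; infer_instance

-- ===== CLAIM (what is proved, stated in full; the proofs are below) =====
def Claim_equal_has_nonempty_unreleased_section_py : Prop := ∀ (changelog : String), Dom_has_nonempty_unreleased_section_py changelog → Spec_has_nonempty_unreleased_section_py changelog (has_nonempty_unreleased_section_py changelog)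

-- ===== LEMMAS AND PROOFS =====

theorem pyA_loop_true_true (l : List String) : pyA_loop l true true = true := by
  induction l with
  | nil => rfl
  | cons line rest ih => simp only [pyA_loop]; split_ifs <;> simp [ih]

theorem pyA_loop_found (l : List String) : pyA_loop l true false = pyB_scan l := by
  induction l with
  | nil => rfl
  | cons line rest ih =>
    simp only [pyA_loop, pyB_scan]
    split_ifs <;> simp_all [pyA_loop_true_true]

theorem pyB_find_shift (l : List String) (k : Nat) :
    pyB_find l (k + 1) = Option.map (· + 1) (pyB_find l k) := by
  induction l generalizing k with
  | nil => rfl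
  | cons line rest ih => simp only [pyB_find]; split_ifs <;> simp [ih]

theorem pyA_eq_pyB (l : List String) :
    pyA_loop l false false =
      (match pyB_find l 0 with
       | none => false
       | some i => pyB_scan (l.drop (i + 1))) := by
  induction l with
  | nil => rfl
  | cons line rest ih =>
    simp only [pyA_loop, pyB_find]
    split_ifs with h h2 h3
    · simp [pyA_loop_found]
    · simp at h2
    · simp at h3
    · rw [ih, pyB_find_shift]
      cases pyB_find rest 0 with
      | none => rfl
      | some j => simp [List.drop_succ_cons]

-- ===== VERDICT (by name: the statement is the Claim_ definition above) =====
theorem has_nonempty_unreleased_section_py_spec : Claim_equal_has_nonempty_unreleased_section_py := by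
  intro changelog _
  unfold Spec_has_nonempty_unreleased_section_py has_nonempty_unreleased_section_py
    has_nonempty_unreleased_section_py_alt
  exact pyA_eq_pyB _
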